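-- pv_equiv track=rewrite | github.com/pypi-data/pypi-mirror-376 | packages/twilkit/twilkit-2.0.0.tar.gz/twilkit-2.0.0/twilkit/ADVfile_manager/core.py | _infer_fieldnames
-- ===== SOURCE A (Python) =====
-- from typing import (
--     Any,
--     Dict,
--     List,
--     Iterable,
--     Optional,
--     Generator,
--     Tuple,
--     Iterator,
--     Sequence,
--     Union,
-- )
--
-- def _infer_fieldnames(rows: Iterable[Dict[str, Any]]) -> List[str]:
--     """
--     Infer CSV header fieldnames from a list of dicts.
--
--     Parameters
--     ----------
--     rows : Iterable[Dict[str, Any]]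
--         Data rows to infer from.
--
--     Returns
--     -------
--     List[str]
--         Fieldnames in first-seen order.
--
--     Raises
--     ------
--     ValueError
--         If rows are empty and no fieldnames can be inferred.
--     """
--     fields: List[str] = []
--     seen = set()
--     for row in rows:
--         for k in row.keys():
--             if k not in seen:
--                 seen.add(k)
--                 fields.append(k)
--     if not fields:
--         raise ValueError("Cannot infer CSV header from empty data")
--     return fields
-- ===== SOURCE B (Python) =====
-- def _infer_fieldnames(rows):
--     # Record each key's FIRST occurrence index by overwriting while scanning the
--     # flattened key stream in reverse, then sort the distinct keys by that index.
--     keys = [k for row in rows for k in row]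
--     first = {}
--     for i, k in reversed(list(enumerate(keys))):
--         first[k] = i
--     fields = sorted(first, key=first.get)
--     if not fields:
--         raise ValueError("Cannot infer CSV header from empty data")
--     return fields
-- ===== Notes on version B (the rewrite author's own statement) =====
-- stated objective: alternative
-- what changed: A runs one forward pass with a seen-set and a conditional append; B has no membership test at all: it maps every distinct key to its first-occurrence index by overwriting a dict while scanning the flattened key stream in reverse, then sorts the keys by that index.
import Mathlib
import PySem

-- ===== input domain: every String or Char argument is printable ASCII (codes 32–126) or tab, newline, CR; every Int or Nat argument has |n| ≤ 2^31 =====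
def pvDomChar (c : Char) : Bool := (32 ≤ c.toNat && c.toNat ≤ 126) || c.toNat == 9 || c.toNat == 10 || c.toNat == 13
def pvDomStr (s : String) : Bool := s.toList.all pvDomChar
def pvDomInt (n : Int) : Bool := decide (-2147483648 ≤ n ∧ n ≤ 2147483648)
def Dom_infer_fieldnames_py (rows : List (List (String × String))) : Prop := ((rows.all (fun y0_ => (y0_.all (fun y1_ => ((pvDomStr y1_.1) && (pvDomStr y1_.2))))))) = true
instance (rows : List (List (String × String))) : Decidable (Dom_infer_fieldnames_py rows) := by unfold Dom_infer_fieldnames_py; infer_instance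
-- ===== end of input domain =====

-- B replaces A's forward pass with a seen-set by a different algorithm: map each key to its
-- first-occurrence index (reverse scan with overwrite, no membership test), then sort by that index.

-- ===== PORT A =====
-- state: (fields, seen); per key k: if k not in seen then add to seen and append to fields
def infer_fieldnames_py (rows : List (List (String × String))) : List String :=
  let st := rows.foldl
    (fun st row =>
      row.foldl
        (fun st kv =>
          if st.2.contains kv.1 then st
          else (st.1 ++ [kv.1], PySem.Set.add st.2 kv.1))
        st)
    ([], PySem.Set.empty)
  -- `if not fields: raise ValueError(...)` — raising inputs are excluded by Pre_
  st.1

-- ===== PORT B =====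
def infer_fieldnames_py_alt (rows : List (List (String × String))) : List String :=
  -- keys = [k for row in rows for k in row]  (a dict's keys are the pairs' first components, in order)
  let keys := rows.flatMap (fun row => row.map Prod.fst)
  -- for i, k in reversed(list(enumerate(keys))): first[k] = i
  let first := (PySem.List.enumerate keys 0).reverse.foldl
    (fun d p => d.insert p.2 p.1) (PySem.Dict.empty : PySem.Dict String Int)
  -- sorted(first, key=first.get) — every key of `first` is present, so first.get k = first[k]
  PySem.List.sorted first.keys (fun k => first.getD k 0) false
  -- `if not fields: raise ValueError(...)` — raising inputs are excluded by Pre_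

-- ===== PRECONDITION & SPEC =====
-- Pre_ excludes exactly the inputs (no key in any row) on which A raises ValueError.
def Pre_infer_fieldnames_py (rows : List (List (String × String))) : Prop :=
  (rows.any (fun row => !row.isEmpty)) = true
instance (rows : List (List (String × String))) : Decidable (Pre_infer_fieldnames_py rows) := by unfold Pre_infer_fieldnames_py; infer_instance

def pvWitness_infer_fieldnames_py : (List (List (String × String))) := [[("a", "1")]]

def Spec_infer_fieldnames_py (rows : List (List (String × String))) (out : List String) : Prop := out = infer_fieldnames_py_alt rows
instance (rows : List (List (String × String))) (out : List String) : Decidable (Spec_infer_fieldnames_py rows out) := by unfold Spec_infer_fieldnames_py; infer_instance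

-- ===== CLAIM (what is proved, stated in full; the proofs are below) =====
def Claim_equal_infer_fieldnames_py : Prop := ∀ (rows : List (List (String × String))), Dom_infer_fieldnames_py rows → Pre_infer_fieldnames_py rows → Spec_infer_fieldnames_py rows (infer_fieldnames_py rows)

-- ===== LEMMAS AND PROOFS =====

-- A's inner loop with fields = seen mirrors folding Set.add, keeping the two components equal
lemma inner_loop_pair (ks : List (String × String)) (s : PySem.Set String) :
    ks.foldl
      (fun st kv =>
        if st.2.contains kv.1 then st
        else (st.1 ++ [kv.1], PySem.Set.add st.2 kv.1))
      (s, s)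
      = (ks.foldl (fun s kv => PySem.Set.add s kv.1) s,
         ks.foldl (fun s kv => PySem.Set.add s kv.1) s) := by
  induction ks generalizing s with
  | nil => rfl
  | cons kv t ih =>
      simp only [List.foldl_cons]
      by_cases h : s.contains kv.1 = true
      · rw [if_pos h]
        have ha : PySem.Set.add s kv.1 = s := by rw [PySem.Set.add, if_pos h]
        rw [ha]
        exact ih s
      · rw [if_neg h]
        have ha : s ++ [kv.1] = PySem.Set.add s kv.1 := by rw [PySem.Set.add, if_neg h]
        rw [ha]
        exact ih _

-- hence A computes set(flattened keys) in first-seen order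
lemma outer_loop_pair (rows : List (List (String × String))) (s : PySem.Set String) :
    rows.foldl
      (fun st row =>
        row.foldl
          (fun st kv =>
            if st.2.contains kv.1 then st
            else (st.1 ++ [kv.1], PySem.Set.add st.2 kv.1))
          st)
      (s, s)
      = ((rows.flatMap (fun row => row.map Prod.fst)).foldl PySem.Set.add s,
         (rows.flatMap (fun row => row.map Prod.fst)).foldl PySem.Set.add s) := by
  induction rows generalizing s with
  | nil => rfl
  | cons r t ih =>
      simp only [List.foldl_cons, inner_loop_pair, List.flatMap_cons, List.foldl_append, ih,
        List.foldl_map]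

-- folding Set.add from s appends exactly the deduplicated new elements, filtered against s
lemma foldl_add_filter (ys : List String) (s : List String) :
    ys.foldl PySem.Set.add s
      = s ++ (PySem.Set.ofList ys).filter (fun k => !PySem.Set.contains s k) := by
  induction ys generalizing s with
  | nil => simp
  | cons y t ih =>
      have hof : PySem.Set.ofList (y :: t) = t.foldl PySem.Set.add [y] := by
        simp [PySem.Set.ofList_eq_foldl, PySem.Set.add]
      rw [List.foldl_cons]
      by_cases hc : PySem.Set.contains s y = true
      · have ha : PySem.Set.add s y = s := by rw [PySem.Set.add, if_pos hc]
        have hy : y ∈ s := (PySem.Set.contains_iff s y).mp hc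
        rw [ha, ih, hof, ih [y], List.filter_append, List.filter_filter]
        have h1 : List.filter (fun k => !PySem.Set.contains s k) [y] = [] := by
          simp [PySem.Set.contains_eq_listContains, hy]
        rw [h1, List.nil_append]
        congr 1
        apply List.filter_congr
        intro z hz
        simp only [PySem.Set.contains_eq_listContains, List.contains_eq_mem]
        by_cases hzs : z ∈ s
        · simp [hzs]
        · have hzy : z ≠ y := fun he => hzs (he ▸ hy)
          simp [hzs, hzy]
      · have ha : PySem.Set.add s y = s ++ [y] := by rw [PySem.Set.add, if_neg hc]
        have hy : y ∉ s := fun hm => hc ((PySem.Set.contains_iff s y).mpr hm)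
        rw [ha, ih, hof, ih [y], List.filter_append, List.filter_filter]
        have h1 : List.filter (fun k => !PySem.Set.contains s k) [y] = [y] := by
          simp [PySem.Set.contains_eq_listContains, hy]
        rw [h1, List.append_assoc]
        congr 2
        apply List.filter_congr
        intro z hz
        simp only [PySem.Set.contains_eq_listContains, List.contains_eq_mem, List.mem_append,
          List.mem_singleton]
        by_cases hzy : z = y
        · simp [hzy, hy]
        · simp [hzy]

-- ofList peels its head: set-of (x :: xs) = x followed by set-of xs without x
lemma ofList_cons (x : String) (xs : List String) :
    PySem.Set.ofList (x :: xs)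
      = x :: (PySem.Set.ofList xs).filter (fun k => !(k == x)) := by
  have h2 : PySem.Set.ofList (x :: xs) = [x] ++ (PySem.Set.ofList xs).filter
      (fun k => !PySem.Set.contains [x] k) := by
    rw [PySem.Set.ofList_eq_foldl, List.foldl_cons]
    have ha : PySem.Set.add [] x = [x] := by rfl
    rw [ha]
    exact foldl_add_filter xs [x]
  rw [h2]
  simp only [List.singleton_append, List.cons.injEq, true_and]
  apply List.filter_congr
  intro z hz
  by_cases hzx : z = x <;> simp [hzx]

-- the dedup is strictly increasing in first-occurrence index
lemma pairwise_idxOf_ofList (xs : List String) :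
    (PySem.Set.ofList xs).Pairwise (fun a b => xs.idxOf a < xs.idxOf b) := by
  induction xs with
  | nil => simp [PySem.Set.ofList]
  | cons x t ih =>
      rw [ofList_cons]
      constructor
      · intro b hb
        have hbx' : b ≠ x := by
          have := (List.mem_filter.mp hb).2
          simpa using this
        rw [List.idxOf_cons_self, List.idxOf_cons_ne _ (Ne.symm hbx')]
        omega
      · have := List.Pairwise.filter (fun k => !(k == x)) ih
        apply List.Pairwise.imp_of_mem ?_ this
        intro a b ha hb hlt
        have hax : a ≠ x := by have := (List.mem_filter.mp ha).2; simpa using this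
        have hbx : b ≠ x := by have := (List.mem_filter.mp hb).2; simpa using this
        rw [List.idxOf_cons_ne _ (Ne.symm hax), List.idxOf_cons_ne _ (Ne.symm hbx)]
        omega

-- B's dict maps k to s + (first index of k), none if absent
lemma get?_buildFirst (l : List String) (s : Int) (k : String) :
    ((PySem.List.enumerate l s).foldr (fun p d => d.insert p.2 p.1)
        (PySem.Dict.empty : PySem.Dict String Int)).get? k
      = if k ∈ l then some (s + (l.idxOf k : Int)) else none := by
  induction l generalizing s with
  | nil => simp [PySem.List.enumerate_nil, PySem.Dict.get?_empty]
  | cons x t ih =>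
      rw [PySem.List.enumerate_cons, List.foldr_cons, PySem.Dict.get?_insert, ih]
      by_cases hkx : k = x
      · simp [hkx]
      · rw [if_neg hkx]
        by_cases hm : k ∈ t
        · have hmem : k ∈ x :: t := List.mem_cons_of_mem _ hm
          rw [if_pos hm, if_pos hmem, List.idxOf_cons_ne _ (Ne.symm hkx)]
          push_cast
          ring_nf
        · have hnm : k ∉ x :: t := by simp [hkx, hm]
          rw [if_neg hm, if_neg hnm]

-- B's result is the dedup of the flattened key stream
lemma alt_eq_ofList (rows : List (List (String × String))) :
    infer_fieldnames_py_alt rows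
      = PySem.Set.ofList (rows.flatMap (fun row => row.map Prod.fst)) := by
  rw [infer_fieldnames_py_alt]
  set keys := rows.flatMap (fun row => row.map Prod.fst) with hkeys
  set first := (PySem.List.enumerate keys 0).reverse.foldl
    (fun d p => d.insert p.2 p.1) (PySem.Dict.empty : PySem.Dict String Int) with hfirst
  have hfoldr : first = (PySem.List.enumerate keys 0).foldr
      (fun p d => d.insert p.2 p.1) PySem.Dict.empty := by
    rw [hfirst, List.foldl_reverse]
  have hget : ∀ k, first.get? k
      = if k ∈ keys then some ((keys.idxOf k : Int)) else none := by
    intro k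
    rw [hfoldr, get?_buildFirst]
    simp
  have hkeys1 : first.keys = PySem.Set.ofList keys.reverse := by
    rw [hfirst]
    rw [PySem.Dict.keys_foldl_insert_key ((PySem.List.enumerate keys 0).reverse) Prod.snd
      (fun d x => x.1) PySem.Dict.empty]
    have hm : ((PySem.List.enumerate keys 0).reverse.map Prod.snd) = keys.reverse := by
      rw [List.map_reverse, PySem.List.map_snd_enumerate]
    rw [hm]
    simp [PySem.Dict.keys_empty, PySem.Set.update_nil_left]
  have hperm : (PySem.Set.ofList keys).Perm first.keys := by
    rw [hkeys1]
    rw [List.perm_ext_iff_of_nodup (PySem.Set.nodup_ofList _) (PySem.Set.nodup_ofList _)]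
    intro a
    simp [PySem.Set.mem_ofList]
  have hpw : (PySem.Set.ofList keys).Pairwise
      (fun a b => (fun k => first.getD k 0) a < (fun k => first.getD k 0) b) := by
    apply List.Pairwise.imp_of_mem ?_ (pairwise_idxOf_ofList keys)
    intro a b ha hb hlt
    have ha' : a ∈ keys := (PySem.Set.mem_ofList _ _).mp ha
    have hb' : b ∈ keys := (PySem.Set.mem_ofList _ _).mp hb
    simp only [PySem.Dict.getD_eq_get?_getD, hget, if_pos ha', if_pos hb', Option.getD_some]
    exact_mod_cast hlt
  exact PySem.List.sorted_eq_of_perm_of_pairwise_lt _ _ _ hperm hpw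

-- ===== VERDICT (by name: the statement is the Claim_ definition above) =====
theorem infer_fieldnames_py_spec : Claim_equal_infer_fieldnames_py := by
  intro rows _ _
  show infer_fieldnames_py rows = infer_fieldnames_py_alt rows
  simp only [infer_fieldnames_py, PySem.Set.empty]
  rw [outer_loop_pair, alt_eq_ofList, PySem.Set.ofList_eq_foldl]
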